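-- pv_equiv track=rewrite | github.com/metodj/Project-Euler | euler76.py | particija_rekurzija
-- ===== SOURCE A (Python) =====
-- def particija_rekurzija(n, r):
--     if r == 1:
--         return 1
--     elif r == n:
--         return 1
--     elif n < r:
--         return 0
--     else:
--         return particija_rekurzija(n - 1, r - 1) + particija_rekurzija(n - r, r)
-- ===== SOURCE B (Python) =====
-- def particija_rekurzija(n, r):
--     if r == 1 or n == r:
--         return 1
--     if n < r:
--         return 0
--     # n > r >= 2 here (for r >= 1): bottom-up DP over rows j = number of parts
--     prev = [0] + [1] * n          # row j = 1
--     for j in range(2, r + 1):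
--         cur = [0] * j
--         for i in range(j, n + 1):
--             cur.append(prev[i - 1] + cur[i - j])
--         prev = cur
--     return prev[n]
-- ===== Notes on version B (the rewrite author's own statement) =====
-- stated objective: faster
-- what changed: Replaces the exponential unmemoized two-branch recursion by a bottom-up O(n*r) dynamic-programming table built row by row over the number of parts.
import Mathlib
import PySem

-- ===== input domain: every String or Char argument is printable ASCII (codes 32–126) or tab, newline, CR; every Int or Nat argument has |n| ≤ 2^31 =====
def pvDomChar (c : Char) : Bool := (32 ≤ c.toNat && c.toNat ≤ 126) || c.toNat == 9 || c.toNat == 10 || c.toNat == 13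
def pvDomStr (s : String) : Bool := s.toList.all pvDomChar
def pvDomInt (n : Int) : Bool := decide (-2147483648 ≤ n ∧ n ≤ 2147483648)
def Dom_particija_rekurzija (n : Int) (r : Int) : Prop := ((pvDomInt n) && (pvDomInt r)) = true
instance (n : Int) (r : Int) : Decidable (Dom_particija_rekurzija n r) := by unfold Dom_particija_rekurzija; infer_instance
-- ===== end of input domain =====

-- B replaces A's exponential unmemoized recursion by a bottom-up O(n*r) DP table (faster, asymptotic).


-- ===== PORT A =====
-- fuel makes the recursion total in Lean; inside Pre_ the fuel n.toNat + 1 is proved sufficient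
def particijaFuel : Nat → Int → Int → Int
  | 0, _, _ => 0
  | f + 1, n, r =>
    if r = 1 then 1
    else if r = n then 1
    else if n < r then 0
    else particijaFuel f (n - 1) (r - 1) + particijaFuel f (n - r) r

def particija_rekurzija (n : Int) (r : Int) : Int :=
  particijaFuel (n.toNat + 1) n r

-- ===== PORT B =====
-- one DP row: cur = [0]*j; for i in range(j, n+1): cur.append(prev[i-1] + cur[i-j])
def pvRow (prev : List Int) (j N : Nat) : List Int :=
  (List.range' j (N + 1 - j)).foldl
    (fun cur i => cur ++ [prev.getD (i - 1) 0 + cur.getD (i - j) 0])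
    (List.replicate j 0)

def particija_rekurzija_alt (n : Int) (r : Int) : Int :=
  if r = 1 ∨ n = r then 1
  else if n < r then 0
  else
    let N := n.toNat
    let row1 : List Int := 0 :: List.replicate N 1
    let final := (List.range' 2 (r.toNat - 1)).foldl (fun prev j => pvRow prev j N) row1
    final.getD N 0

-- ===== PRECONDITION & SPEC =====
-- Pre_ excludes exactly the inputs (r ≤ 0 and r < n) on which Python A recurses forever
-- (RecursionError): on them A returns no value.
def Pre_particija_rekurzija (n : Int) (r : Int) : Prop := 1 ≤ r ∨ n ≤ r
instance (n : Int) (r : Int) : Decidable (Pre_particija_rekurzija n r) := by unfold Pre_particija_rekurzija; infer_instance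
def pvWitness_particija_rekurzija : Int × Int := (5, 2)

def Spec_particija_rekurzija (n : Int) (r : Int) (out : Int) : Prop := out = particija_rekurzija_alt n r
instance (n : Int) (r : Int) (out : Int) : Decidable (Spec_particija_rekurzija n r out) := by unfold Spec_particija_rekurzija; infer_instance

-- ===== CLAIM (what is proved, stated in full; the proofs are below) =====
def Claim_equal_particija_rekurzija : Prop := ∀ (n : Int) (r : Int), Dom_particija_rekurzija n r → Pre_particija_rekurzija n r → Spec_particija_rekurzija n r (particija_rekurzija n r)

-- ===== LEMMAS AND PROOFS =====

-- mathematical reference: P i j = A's value for i parts-count j (j ≥ 1), with row-1 semantics P 0 1 = 0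
def P : Nat → Nat → Int
  | i, j =>
    if j ≤ 1 then (if 1 ≤ i then 1 else 0)
    else if i < j then 0
    else P (i - 1) (j - 1) + P (i - j) j
  termination_by i _ => i
  decreasing_by all_goals omega

theorem P_zero (j : Nat) (hj : 2 ≤ j) : P 0 j = 0 := by
  rw [P, if_neg (by omega : ¬ j ≤ 1), if_pos (by omega : 0 < j)]

theorem P_diag : ∀ j : Nat, 1 ≤ j → P j j = 1 := by
  intro j
  induction j with
  | zero => omega
  | succ k ih =>
    intro _
    by_cases hk : k = 0
    · subst hk; rw [P]; simp
    · rw [P, if_neg (by omega : ¬ k + 1 ≤ 1), if_neg (lt_irrefl (k+1))]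
      have e0 : k + 1 - (k + 1) = 0 := by omega
      have e1 : k + 1 - 1 = k := by omega
      rw [e0, e1, ih (by omega), P_zero (k+1) (by omega)]
      norm_num

theorem A_eq_P : ∀ (m : Nat) (n r : Int) (f : Nat), n.toNat = m → 2 ≤ r → r < n →
    n.toNat + 1 ≤ f → particijaFuel f n r = P n.toNat r.toNat := by
  intro m
  induction m using Nat.strong_induction_on with
  | _ m ih =>
    intro n r f hm h2 hrn hf
    have hn3 : 3 ≤ n := by omega
    obtain ⟨f', rfl⟩ : ∃ f', f = f' + 1 := ⟨f - 1, by omega⟩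
    rw [particijaFuel]
    have : ¬ r = 1 := by omega
    rw [if_neg this]
    have : ¬ r = n := by omega
    rw [if_neg this]
    have : ¬ n < r := by omega
    rw [if_neg this]
    rw [P]
    have hj1 : ¬ r.toNat ≤ 1 := by omega
    have hij : ¬ n.toNat < r.toNat := by omega
    rw [if_neg hj1, if_neg hij]
    have e1 : (n - 1).toNat = n.toNat - 1 := by omega
    have e2 : (n - r).toNat = n.toNat - r.toNat := by omega
    have e3 : (r - 1).toNat = r.toNat - 1 := by omega
    -- first call
    have call1 : particijaFuel f' (n - 1) (r - 1) = P (n.toNat - 1) (r.toNat - 1) := by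
      by_cases hr2 : r = 2
      · have er : r - 1 = 1 := by omega
        have ern : r.toNat - 1 = 1 := by omega
        obtain ⟨f'', rfl⟩ : ∃ f'', f' = f'' + 1 := ⟨f' - 1, by omega⟩
        rw [er, ern, particijaFuel, if_pos rfl, P, if_pos (le_refl 1),
            if_pos (by omega : 1 ≤ n.toNat - 1)]
      · have : particijaFuel f' (n - 1) (r - 1) = P (n - 1).toNat (r - 1).toNat := by
          apply ih (n - 1).toNat (by omega) (n - 1) (r - 1) f' rfl (by omega) (by omega) (by omega)
        rw [this, e1, e3]
    rw [call1]
    -- second call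
    have call2 : particijaFuel f' (n - r) r = P (n.toNat - r.toNat) r.toNat := by
      rcases lt_trichotomy (n - r) r with hlt | heq | hgt
      · obtain ⟨f'', rfl⟩ : ∃ f'', f' = f'' + 1 := ⟨f' - 1, by omega⟩
        rw [particijaFuel]
        rw [if_neg (by omega : ¬ (r : Int) = 1), if_neg (by omega : ¬ (r : Int) = n - r),
            if_pos hlt]
        rw [P, if_neg (by omega : ¬ r.toNat ≤ 1), if_pos (by omega : n.toNat - r.toNat < r.toNat)]
      · obtain ⟨f'', rfl⟩ : ∃ f'', f' = f'' + 1 := ⟨f' - 1, by omega⟩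
        rw [particijaFuel]
        rw [if_neg (by omega : ¬ (r : Int) = 1), if_pos (by omega : (r : Int) = n - r)]
        have hnr : n.toNat - r.toNat = r.toNat := by omega
        rw [hnr, P_diag r.toNat (by omega)]
      · have : particijaFuel f' (n - r) r = P (n - r).toNat r.toNat := by
          apply ih (n - r).toNat (by omega) (n - r) r f' rfl (by omega) (by omega) (by omega)
        rw [this, e2]
    rw [call2]

-- B side: the inner fold builds the row values P · j
theorem row_fold : ∀ (c k j N : Nat) (prev cur : List Int),
    2 ≤ j → j ≤ k → cur.length = k → k + c ≤ N + 1 →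
    (∀ i, i ≤ N → prev.getD i 0 = P i (j - 1)) →
    (∀ i, i < k → cur.getD i 0 = P i j) →
    let res := (List.range' k c).foldl
      (fun cur i => cur ++ [prev.getD (i - 1) 0 + cur.getD (i - j) 0]) cur
    res.length = k + c ∧ (∀ i, i < k + c → res.getD i 0 = P i j) := by
  intro c
  induction c with
  | zero =>
    intro k j N prev cur _ _ hlen _ _ hcur
    simpa [List.range'] using ⟨hlen, hcur⟩
  | succ c ihc =>
    intro k j N prev cur hj hjk hlen hkc hprev hcur
    rw [List.range'_succ]
    simp only [List.foldl_cons]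
    have hval : cur.getD (k - j) 0 = P (k - j) j := hcur _ (by omega)
    have hpval : prev.getD (k - 1) 0 = P (k - 1) (j - 1) := hprev _ (by omega)
    have hPk : P k j = P (k - 1) (j - 1) + P (k - j) j := by
      rw [P, if_neg (by omega : ¬ j ≤ 1), if_neg (by omega : ¬ k < j)]
    have step := ihc (k + 1) j N prev
      (cur ++ [prev.getD (k - 1) 0 + cur.getD (k - j) 0])
      hj (by omega) (by simp [hlen]) (by omega) hprev ?_
    · have : k + 1 + c = k + (c + 1) := by omega
      rw [this] at step
      exact step
    · intro i hi
      rcases Nat.lt_or_ge i k with h | h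
      · rw [List.getD_append _ _ _ _ (by omega), hcur i h]
      · have hik : i = k := by omega
        subst hik
        rw [hval, hpval, List.getD_eq_getElem?_getD]
        rw [List.getElem?_append_right (by omega)]
        simp [hlen, hPk]

theorem row1_spec (N : Nat) : ∀ i, i ≤ N → (0 :: List.replicate N 1 : List Int).getD i 0 = P i 1 := by
  intro i hi
  rw [P]
  cases i with
  | zero => simp
  | succ k =>
    simp only [if_pos (le_refl 1), if_pos (by omega : 1 ≤ k + 1)]
    rw [List.getD_cons_succ, List.getD_eq_getElem?_getD, List.getElem?_replicate]
    have : k < N := by omega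
    simp [this]

theorem rows_fold : ∀ (c j N : Nat) (prev : List Int),
    2 ≤ j → j + c ≤ N + 1 →
    (∀ i, i ≤ N → prev.getD i 0 = P i (j - 1)) →
    (∀ i, i ≤ N → ((List.range' j c).foldl (fun prev j => pvRow prev j N) prev).getD i 0
        = P i (j - 1 + c)) := by
  intro c
  induction c with
  | zero => intro j N prev _ _ hprev; simpa using hprev
  | succ c ihc =>
    intro j N prev hj hjc hprev
    rw [List.range'_succ]
    simp only [List.foldl_cons]
    have hrow : ∀ i, i ≤ N → (pvRow prev j N).getD i 0 = P i j := by
      intro i hi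
      have hfold := row_fold (N + 1 - j) j j N prev (List.replicate j 0)
        hj (le_refl j) (by simp) (by omega) hprev
        (by intro i hi
            rw [List.getD_eq_getElem?_getD, List.getElem?_replicate, if_pos hi]
            rw [P, if_neg (by omega : ¬ j ≤ 1), if_pos hi]
            simp)
      have hN : j + (N + 1 - j) = N + 1 := by omega
      rw [hN] at hfold
      exact hfold.2 i (by omega)
    have := ihc (j + 1) N (pvRow prev j N) (by omega) (by omega)
      (by intro i hi; simpa using hrow i hi)
    intro i hi
    have h := this i hi
    have : j + 1 - 1 + c = j - 1 + (c + 1) := by omega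
    rw [this] at h
    exact h

-- ===== VERDICT (by name: the statement is the Claim_ definition above) =====
theorem particija_rekurzija_spec : Claim_equal_particija_rekurzija := by
  intro n r _ hpre
  unfold Spec_particija_rekurzija particija_rekurzija particija_rekurzija_alt
  by_cases h1 : r = 1 ∨ n = r
  · rw [if_pos h1]
    rw [particijaFuel]
    rcases h1 with h | h
    · rw [if_pos h]
    · by_cases hr1 : r = 1
      · rw [if_pos hr1]
      · rw [if_neg hr1, if_pos h.symm]
  · rw [if_neg h1]
    by_cases h2 : n < r
    · rw [if_pos h2]
      rw [particijaFuel]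
      rw [if_neg (by tauto : ¬ r = 1), if_neg (by intro h; exact h1 (Or.inr h.symm)), if_pos h2]
    · rw [if_neg h2]
      -- here r ≥ 2 and r < n
      have hr2 : 2 ≤ r := by
        rcases hpre with h | h
        · rcases (by tauto : ¬ r = 1) with _; omega
        · omega
      have hrn : r < n := by
        have : ¬ n = r := by tauto
        omega
      rw [A_eq_P n.toNat n r (n.toNat + 1) rfl hr2 hrn (le_refl _)]
      have hrows := rows_fold (r.toNat - 1) 2 n.toNat (0 :: List.replicate n.toNat 1)
        (le_refl 2) (by omega) (by simpa using row1_spec n.toNat)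
      have h := hrows n.toNat (le_refl _)
      simp only at h ⊢
      rw [h]
      congr 1
      omega
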